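-- pv_equiv track=rewrite | github.com/anshumaneducation/cyber-security-trainer | Cryptography/sDES.py | sdes_encrypt
-- ===== SOURCE A (Python) =====
-- P10 = [3, 5, 2, 7, 4, 10, 1, 9, 8, 6]  # Permutation P10
--
-- P8 = [6, 3, 7, 4, 8, 5, 10, 9]        # Permutation P8
--
-- P4 = [2, 4, 3, 1]                      # Permutation P4
--
-- IP = [2, 6, 3, 1, 4, 8, 5, 7]          # Initial Permutation IP
--
-- IP_INV = [4, 1, 3, 5, 7, 2, 8, 6]      # Inverse Initial Permutation IP^(-1)
--
-- EP = [4, 1, 2, 3, 2, 3, 4, 1]          # Expansion Permutation EP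
--
-- S0 = [[1, 0, 3, 2],
--       [3, 2, 1, 0],
--       [0, 2, 1, 3],
--       [3, 1, 3, 2]]                     # S-Box S0
--
-- S1 = [[0, 1, 2, 3],
--       [2, 0, 1, 3],
--       [3, 0, 1, 0],
--       [2, 1, 0, 3]]                     # S-Box S1
--
-- def permutate(original, permutation):
--     """Permute the bits according to the given permutation."""
--     return [original[i - 1] for i in permutation]
--
-- def left_shift(bits, shifts):
--     """Left shift the bits by the specified number of shifts."""
--     return bits[shifts:] + bits[:shifts]
--
-- def xor(bits1, bits2):
--     """Perform bitwise XOR between two bit lists."""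
--     return [b1 ^ b2 for b1, b2 in zip(bits1, bits2)]
--
-- def sbox_lookup(bits, sbox):
--     """Lookup the value in the specified S-Box."""
--     row = (bits[0] << 1) | bits[3]
--     col = (bits[1] << 1) | bits[2]
--     return [int(x) for x in format(sbox[row][col], '02b')]
--
-- def generate_keys(key):
--     """Generate the two subkeys from the main key."""
--     key = permutate(key, P10)
--     left, right = key[:5], key[5:]
--
--     left = left_shift(left, 1)
--     right = left_shift(right, 1)
--     k1 = permutate(left + right, P8)
--
--     left = left_shift(left, 2)
--     right = left_shift(right, 2)
--     k2 = permutate(left + right, P8)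
--
--     return k1, k2
--
-- def fk(bits, key):
--     """Feistel function used in the encryption and decryption."""
--     left, right = bits[:4], bits[4:]
--     temp = permutate(right, EP)
--     temp = xor(temp, key)
--     left_half = sbox_lookup(temp[:4], S0)
--     right_half = sbox_lookup(temp[4:], S1)
--     temp = permutate(left_half + right_half, P4)
--     return xor(left, temp) + right
--
-- def sdes_encrypt_block(block, k1, k2):
--     """Encrypt an 8-bit block using the two subkeys."""
--     bits = permutate(block, IP)
--     bits = fk(bits, k1)
--     bits = bits[4:] + bits[:4]  # Switch the left and right halves
--     bits = fk(bits, k2)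
--     ciphertext = permutate(bits, IP_INV)
--     return ciphertext
--
-- def string_to_bits(s):
--     """Convert a string to a list of bits."""
--     return [int(bit) for char in s for bit in format(ord(char), '08b')]
--
-- def bits_to_string(bits):
--     """Convert a list of bits to a string."""
--     return ''.join(chr(int(''.join(map(str, bits[i:i+8])), 2)) for i in range(0, len(bits), 8))
--
-- def sdes_encrypt(plaintext, key):
--     """Encrypt a plaintext string using the given key."""
--     key_bits = string_to_bits(key)
--     plaintext_bits = string_to_bits(plaintext)
--     k1, k2 = generate_keys(key_bits[:10])
--
--     ciphertext_bits = []
--     for i in range(0, len(plaintext_bits), 8):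
--         block = plaintext_bits[i:i+8]
--         if len(block) < 8:
--             block += [0] * (8 - len(block))
--         ciphertext_bits.extend(sdes_encrypt_block(block, k1, k2))
--     return bits_to_string(ciphertext_bits)
-- ===== SOURCE B (Python) =====
-- # Integer re-implementation of S-DES: blocks/keys are ints, permutations via
-- # shifts & masks; requires a key with at least 10 bits (>= 2 chars).
-- P10 = [3, 5, 2, 7, 4, 10, 1, 9, 8, 6]
-- P8 = [6, 3, 7, 4, 8, 5, 10, 9]
-- P4 = [2, 4, 3, 1]
-- IP = [2, 6, 3, 1, 4, 8, 5, 7]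
-- IP_INV = [4, 1, 3, 5, 7, 2, 8, 6]
-- EP = [4, 1, 2, 3, 2, 3, 4, 1]
-- S0 = [[1, 0, 3, 2], [3, 2, 1, 0], [0, 2, 1, 3], [3, 1, 3, 2]]
-- S1 = [[0, 1, 2, 3], [2, 0, 1, 3], [3, 0, 1, 0], [2, 1, 0, 3]]
--
-- def _perm(val, n, table):
--     """Permute an n-bit integer: output bit j is input bit table[j] (1-based from MSB)."""
--     out = 0
--     for p in table:
--         out = (out << 1) | ((val >> (n - p)) & 1)
--     return out
--
-- def _rol5(x, s):
--     return ((x << s) | (x >> (5 - s))) & 0x1F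
--
-- def _keys(key10):
--     k = _perm(key10, 10, P10)
--     left, right = _rol5(k >> 5, 1), _rol5(k & 0x1F, 1)
--     k1 = _perm((left << 5) | right, 10, P8)
--     left, right = _rol5(left, 2), _rol5(right, 2)
--     k2 = _perm((left << 5) | right, 10, P8)
--     return k1, k2
--
-- def _sbox(x, sbox):
--     row = (((x >> 3) & 1) << 1) | (x & 1)
--     col = (((x >> 2) & 1) << 1) | ((x >> 1) & 1)
--     return sbox[row][col]
--
-- def _fk(block, k):
--     left, right = block >> 4, block & 0xF
--     t = _perm(right, 4, EP) ^ k
--     s = (_sbox(t >> 4, S0) << 2) | _sbox(t & 0xF, S1)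
--     return ((left ^ _perm(s, 4, P4)) << 4) | right
--
-- def _encrypt_block(b, k1, k2):
--     x = _perm(b, 8, IP)
--     x = _fk(x, k1)
--     x = ((x & 0xF) << 4) | (x >> 4)
--     x = _fk(x, k2)
--     return _perm(x, 8, IP_INV)
--
-- def sdes_encrypt(plaintext, key):
--     key10 = (ord(key[0]) << 2) | (ord(key[1]) >> 6)
--     k1, k2 = _keys(key10)
--     return ''.join(chr(_encrypt_block(ord(c), k1, k2)) for c in plaintext)
-- ===== Notes on version B (the rewrite author's own statement) =====
-- stated objective: faster
-- what changed: B replaces A's bit-list machinery (permutation tables applied to lists of 0/1 ints, list slicing, zip-based XOR, str/format conversions per bit) with pure integer arithmetic: each block, subkey and intermediate value is a single int, permutations read source bits with shifts and masks, XOR is ^, and the S-box row/col are computed directly from masked bits; subkeys are also computed once instead of rebuilding bit lists per block.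
import Mathlib
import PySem

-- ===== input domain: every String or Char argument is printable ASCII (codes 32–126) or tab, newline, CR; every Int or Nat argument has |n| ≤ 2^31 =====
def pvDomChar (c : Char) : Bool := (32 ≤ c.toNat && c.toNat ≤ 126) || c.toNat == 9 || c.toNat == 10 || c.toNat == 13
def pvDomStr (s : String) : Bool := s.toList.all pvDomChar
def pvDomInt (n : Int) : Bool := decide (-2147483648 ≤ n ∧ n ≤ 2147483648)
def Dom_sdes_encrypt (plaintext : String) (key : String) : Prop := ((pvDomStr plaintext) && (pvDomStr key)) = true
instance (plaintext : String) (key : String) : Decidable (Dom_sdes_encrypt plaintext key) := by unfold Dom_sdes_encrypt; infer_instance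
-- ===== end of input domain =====

set_option maxRecDepth 100000


-- B re-implements S-DES on integers (shifts/masks) instead of A's bit-lists; equal output on every
-- Dom input whose key has at least 2 characters (shorter keys make A raise IndexError).

-- ===== PORT A =====
-- (literal transliteration of Source A; bit lists are lists of the Python ints 0/1)
def pvP10 : List Int := [3, 5, 2, 7, 4, 10, 1, 9, 8, 6]
def pvP8 : List Int := [6, 3, 7, 4, 8, 5, 10, 9]
def pvP4 : List Int := [2, 4, 3, 1]
def pvIP : List Int := [2, 6, 3, 1, 4, 8, 5, 7]
def pvIPINV : List Int := [4, 1, 3, 5, 7, 2, 8, 6]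
def pvEP : List Int := [4, 1, 2, 3, 2, 3, 4, 1]
def pvS0 : List (List Int) := [[1, 0, 3, 2], [3, 2, 1, 0], [0, 2, 1, 3], [3, 1, 3, 2]]
def pvS1 : List (List Int) := [[0, 1, 2, 3], [2, 0, 1, 3], [3, 0, 1, 0], [2, 1, 0, 3]]

-- original[i - 1]; pyGet? none = IndexError (outside Pre_); .getD 0 is an arbitrary placeholder there
def pvPermutate (original : List Int) (permutation : List Int) : List Int :=
  permutation.map (fun i => (PySem.List.pyGet? original (i - 1)).getD 0)

-- bits[shifts:] + bits[:shifts]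
def pvLeftShift (bits : List Int) (shifts : Int) : List Int :=
  PySem.List.slice bits (some shifts) none ++ PySem.List.slice bits none (some shifts)

-- [b1 ^ b2 for b1, b2 in zip(bits1, bits2)]
def pvXor (bits1 bits2 : List Int) : List Int :=
  (bits1.zip bits2).map (fun p => PySem.Int.bxor p.1 p.2)

-- format(v, '0kb'): binary digits of v, zero-padded on the left to width k, then [int(bit) for bit in ...]
def pvFmtBits (v : Int) (k : Nat) : List Int :=
  let ds := PySem.Int.toBinChars v
  (List.replicate (k - ds.length) '0' ++ ds).map (fun ch => if ch = '1' then (1 : Int) else 0)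

def pvSboxLookup (bits : List Int) (sbox : List (List Int)) : List Int :=
  let row := PySem.Int.bor (((PySem.List.pyGet? bits 0).getD 0) <<< 1) ((PySem.List.pyGet? bits 3).getD 0)
  let col := PySem.Int.bor (((PySem.List.pyGet? bits 1).getD 0) <<< 1) ((PySem.List.pyGet? bits 2).getD 0)
  pvFmtBits ((PySem.List.pyGet? ((PySem.List.pyGet? sbox row).getD []) col).getD 0) 2

def pvGenerateKeys (key : List Int) : List Int × List Int :=
  let key1 := pvPermutate key pvP10
  let left := PySem.List.slice key1 none (some 5)
  let right := PySem.List.slice key1 (some 5) none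
  let left1 := pvLeftShift left 1
  let right1 := pvLeftShift right 1
  let k1 := pvPermutate (left1 ++ right1) pvP8
  let left2 := pvLeftShift left1 2
  let right2 := pvLeftShift right1 2
  let k2 := pvPermutate (left2 ++ right2) pvP8
  (k1, k2)

def pvFk (bits key : List Int) : List Int :=
  let left := PySem.List.slice bits none (some 4)
  let right := PySem.List.slice bits (some 4) none
  let temp := pvXor (pvPermutate right pvEP) key
  let left_half := pvSboxLookup (PySem.List.slice temp none (some 4)) pvS0
  let right_half := pvSboxLookup (PySem.List.slice temp (some 4) none) pvS1
  let temp2 := pvPermutate (left_half ++ right_half) pvP4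
  pvXor left temp2 ++ right

def pvEncryptBlock (block k1 k2 : List Int) : List Int :=
  let bits1 := pvPermutate block pvIP
  let bits2 := pvFk bits1 k1
  let bits3 := PySem.List.slice bits2 (some 4) none ++ PySem.List.slice bits2 none (some 4)
  let bits4 := pvFk bits3 k2
  pvPermutate bits4 pvIPINV

-- [int(bit) for char in s for bit in format(ord(char), '08b')]
def pvStringToBits (s : String) : List Int :=
  s.toList.flatMap (fun c => pvFmtBits (c.toNat : Int) 8)

-- int(''.join(map(str, chunk)), 2); every chunk of this program holds only the digits 0/1,
-- on which int-of-binary-string is exactly this MSB-first fold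
def pvBitsToInt (bits : List Int) : Int := bits.foldl (fun a b => 2 * a + b) 0

-- ''.join(chr(int(...)) for i in range(0, len(bits), 8)), one chunk of ≤ 8 bits per step
def pvBitsToChars (bits : List Int) : List Char :=
  if h : bits = [] then []
  else Char.ofNat (pvBitsToInt (bits.take 8)).toNat :: pvBitsToChars (bits.drop 8)
termination_by bits.length
decreasing_by simp only [List.length_drop]; exact Nat.sub_lt (List.length_pos_iff.mpr h) (by omega)

-- for i in range(0, len(plaintext_bits), 8): pad the (final) short block with zeros, encrypt, extend
def pvEncLoop (bits k1 k2 : List Int) : List Int :=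
  if h : bits = [] then []
  else
    let block := bits.take 8
    let block1 := block ++ List.replicate (8 - block.length) 0
    pvEncryptBlock block1 k1 k2 ++ pvEncLoop (bits.drop 8) k1 k2
termination_by bits.length
decreasing_by simp only [List.length_drop]; exact Nat.sub_lt (List.length_pos_iff.mpr h) (by omega)

def sdes_encrypt (plaintext : String) (key : String) : String :=
  let key_bits := pvStringToBits key
  let plaintext_bits := pvStringToBits plaintext
  let ks := pvGenerateKeys (PySem.List.slice key_bits none (some 10))
  String.ofList (pvBitsToChars (pvEncLoop plaintext_bits ks.1 ks.2))

-- ===== PORT B =====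
-- (literal transliteration of Source B; all Python ints here are nonnegative, kept as Nat)
def pvP10N : List Nat := [3, 5, 2, 7, 4, 10, 1, 9, 8, 6]
def pvP8N : List Nat := [6, 3, 7, 4, 8, 5, 10, 9]
def pvP4N : List Nat := [2, 4, 3, 1]
def pvIPN : List Nat := [2, 6, 3, 1, 4, 8, 5, 7]
def pvIPINVN : List Nat := [4, 1, 3, 5, 7, 2, 8, 6]
def pvEPN : List Nat := [4, 1, 2, 3, 2, 3, 4, 1]
def pvS0N : List (List Nat) := [[1, 0, 3, 2], [3, 2, 1, 0], [0, 2, 1, 3], [3, 1, 3, 2]]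
def pvS1N : List (List Nat) := [[0, 1, 2, 3], [2, 0, 1, 3], [3, 0, 1, 0], [2, 1, 0, 3]]

def pvPermN (v n : Nat) (tab : List Nat) : Nat :=
  tab.foldl (fun out p => (out <<< 1) ||| ((v >>> (n - p)) &&& 1)) 0

def pvRol5 (x s : Nat) : Nat := ((x <<< s) ||| (x >>> (5 - s))) &&& 31

def pvKeysN (key10 : Nat) : Nat × Nat :=
  let k := pvPermN key10 10 pvP10N
  let left := pvRol5 (k >>> 5) 1
  let right := pvRol5 (k &&& 31) 1
  let k1 := pvPermN ((left <<< 5) ||| right) 10 pvP8N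
  let left2 := pvRol5 left 2
  let right2 := pvRol5 right 2
  let k2 := pvPermN ((left2 <<< 5) ||| right2) 10 pvP8N
  (k1, k2)

-- row/col are always < 4, so plain getD lookups are exact here
def pvSboxN (x : Nat) (sbox : List (List Nat)) : Nat :=
  let row := ((((x >>> 3) &&& 1) <<< 1) ||| (x &&& 1))
  let col := ((((x >>> 2) &&& 1) <<< 1) ||| ((x >>> 1) &&& 1))
  (sbox.getD row []).getD col 0

def pvFkN (block k : Nat) : Nat :=
  let left := block >>> 4
  let right := block &&& 15
  let t := pvPermN right 4 pvEPN ^^^ k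
  let s := (pvSboxN (t >>> 4) pvS0N <<< 2) ||| pvSboxN (t &&& 15) pvS1N
  ((left ^^^ pvPermN s 4 pvP4N) <<< 4) ||| right

def pvEncBlockN (b k1 k2 : Nat) : Nat :=
  let x1 := pvPermN b 8 pvIPN
  let x2 := pvFkN x1 k1
  let x3 := ((x2 &&& 15) <<< 4) ||| (x2 >>> 4)
  let x4 := pvFkN x3 k2
  pvPermN x4 8 pvIPINVN

def sdes_encrypt_alt (plaintext : String) (key : String) : String :=
  match key.toList with
  | k0 :: k1 :: _ =>
    let key10 := (k0.toNat <<< 2) ||| (k1.toNat >>> 6)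
    let ks := pvKeysN key10
    String.ofList (plaintext.toList.map (fun c => Char.ofNat (pvEncBlockN c.toNat ks.1 ks.2)))
  | _ => ""   -- key[0] / key[1] raises IndexError: outside Pre_

-- ===== PRECONDITION & SPEC =====
-- Pre_ excludes keys of fewer than 2 characters, on which A raises IndexError (a 1-char Dom key
-- yields only 8 key bits and P10 indexes the 10th).
def Pre_sdes_encrypt (plaintext : String) (key : String) : Prop := 2 ≤ PySem.Str.len key
instance (plaintext : String) (key : String) : Decidable (Pre_sdes_encrypt plaintext key) := by
  unfold Pre_sdes_encrypt; infer_instance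

def pvWitness_sdes_encrypt : String × String := ("Hi", "ok")

def Spec_sdes_encrypt (plaintext : String) (key : String) (out : String) : Prop := out = sdes_encrypt_alt plaintext key
instance (plaintext : String) (key : String) (out : String) : Decidable (Spec_sdes_encrypt plaintext key out) := by
  unfold Spec_sdes_encrypt; infer_instance

-- ===== CLAIM (what is proved, stated in full; the proofs are below) =====
def Claim_equal_sdes_encrypt : Prop := ∀ (plaintext : String) (key : String), Dom_sdes_encrypt plaintext key → Pre_sdes_encrypt plaintext key → Spec_sdes_encrypt plaintext key (sdes_encrypt plaintext key)

-- ===== LEMMAS AND PROOFS =====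

-- bridge: the n low bits of v, MSB first, as Python 0/1 ints
def pvToBits : Nat → Nat → List Int
  | 0, _ => []
  | n+1, v => (if v.testBit n then (1 : Int) else 0) :: pvToBits n v

theorem pv_len_toBits (n v : Nat) : (pvToBits n v).length = n := by
  induction n generalizing v with
  | zero => rfl
  | succ n ih => simp [pvToBits, ih]

theorem pv_toBits_congr {n a b : Nat} (h : ∀ i, i < n → a.testBit i = b.testBit i) :
    pvToBits n a = pvToBits n b := by
  induction n with
  | zero => rfl
  | succ n ih => simp [pvToBits, h n (by omega), ih (fun i hi => h i (by omega))]

theorem pv_toBits_mask (n v : Nat) : pvToBits n (v &&& (2 ^ n - 1)) = pvToBits n v := by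
  apply pv_toBits_congr
  intro i hi
  simp [Nat.testBit_and, Nat.testBit_two_pow_sub_one, hi]

theorem pv_toBits_split (m n v : Nat) :
    pvToBits (m + n) v = pvToBits m (v >>> n) ++ pvToBits n v := by
  induction m with
  | zero => simp [pvToBits]
  | succ m ih =>
    have : m + 1 + n = (m + n) + 1 := by omega
    rw [this]
    simp [pvToBits, ih, Nat.testBit_shiftRight, Nat.add_comm n m]

theorem pv_toBits_take (m n v : Nat) : (pvToBits (m + n) v).take m = pvToBits m (v >>> n) := by
  rw [pv_toBits_split]
  exact List.take_left' (pv_len_toBits _ _)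

theorem pv_toBits_drop (m n v : Nat) : (pvToBits (m + n) v).drop m = pvToBits n v := by
  rw [pv_toBits_split]
  exact List.drop_left' (pv_len_toBits _ _)

theorem pv_xor_toBits (n a b : Nat) :
    pvXor (pvToBits n a) (pvToBits n b) = pvToBits n (a ^^^ b) := by
  induction n with
  | zero => rfl
  | succ n ih =>
    simp only [pvToBits, pvXor, List.zip_cons_cons, List.map_cons, Nat.testBit_xor]
    refine List.cons_eq_cons.mpr ⟨?_, ih⟩
    cases ha : a.testBit n <;> cases hb : b.testBit n <;> simp [PySem.Int.bxor]

theorem pv_comb (m n a b : Nat) (hb : b < 2 ^ n) :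
    pvToBits (m + n) ((a <<< n) ||| b) = pvToBits m a ++ pvToBits n b := by
  rw [pv_toBits_split]
  have h1 : ((a <<< n) ||| b) >>> n = a := by
    apply Nat.eq_of_testBit_eq
    intro i
    have hbf : b.testBit (n + i) = false :=
      Nat.testBit_eq_false_of_lt (lt_of_lt_of_le hb (Nat.pow_le_pow_right (by omega) (by omega)))
    simp [Nat.testBit_shiftRight, Nat.testBit_or, Nat.testBit_shiftLeft, hbf]
  have h2 : pvToBits n ((a <<< n) ||| b) = pvToBits n b := by
    apply pv_toBits_congr
    intro i hi
    simp [Nat.testBit_or, Nat.testBit_shiftLeft, Nat.not_le.mpr hi, show ¬ (n ≤ i) by omega]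
  rw [h1, h2]

-- ===== permutation correspondence =====
theorem pv_or_two (a b : Nat) (hb : b < 2) : 2 * a ||| b = 2 * a + b := by
  apply Nat.eq_of_testBit_eq
  intro i
  cases i with
  | zero => interval_cases b <;> simp [Nat.testBit_or] <;> omega
  | succ j =>
    rw [Nat.testBit_or]
    simp only [Nat.testBit_succ]
    have h1 : (2 * a) / 2 = a := by omega
    have h2 : (2 * a + b) / 2 = a := by omega
    interval_cases b <;> simp [h1, h2]

theorem pv_foldl_closed (bs : List Nat) (acc : Nat) :
    bs.foldl (fun a b => 2 * a + b) acc = acc * 2 ^ bs.length + bs.foldl (fun a b => 2 * a + b) 0 := by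
  induction bs generalizing acc with
  | nil => simp
  | cons b bs ih =>
    simp only [List.foldl_cons, List.length_cons]
    rw [ih (2 * acc + b), ih (2 * 0 + b)]
    ring

theorem pv_foldl_lt (bs : List Nat) (h : ∀ b ∈ bs, b < 2) :
    bs.foldl (fun a b => 2 * a + b) 0 < 2 ^ bs.length := by
  induction bs with
  | nil => simp
  | cons b bs ih =>
    simp only [List.foldl_cons, List.length_cons]
    rw [pv_foldl_closed]
    have hb : b < 2 := h b (by simp)
    have hR := ih (fun x hx => h x (by simp [hx]))
    have e0 : (2 * 0 + b) = b := by omega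
    rw [e0]
    calc b * 2 ^ bs.length + bs.foldl (fun a b => 2 * a + b) 0
        < b * 2 ^ bs.length + 2 ^ bs.length := by omega
      _ = (b + 1) * 2 ^ bs.length := by ring
      _ ≤ 2 * 2 ^ bs.length := Nat.mul_le_mul_right _ (by omega)
      _ = 2 ^ (bs.length + 1) := by ring

-- pvToBits of an MSB-first fold of 0/1 digits recovers the digits
theorem pv_toBits_foldl (bs : List Nat) (acc : Nat) (h : ∀ b ∈ bs, b < 2) :
    pvToBits bs.length (bs.foldl (fun a b => 2 * a + b) acc) = bs.map (fun b => Int.ofNat b) := by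
  induction bs generalizing acc with
  | nil => rfl
  | cons b bs ih =>
    simp only [List.foldl_cons, List.length_cons, List.map_cons, pvToBits]
    have hb : b < 2 := h b (by simp)
    have hrest : ∀ x ∈ bs, x < 2 := fun x hx => h x (by simp [hx])
    set X := bs.foldl (fun a b => 2 * a + b) (2 * acc + b) with hX
    have hcl : X = (2 * acc + b) * 2 ^ bs.length + bs.foldl (fun a b => 2 * a + b) 0 :=
      pv_foldl_closed bs _
    have hlt : bs.foldl (fun a b => 2 * a + b) 0 < 2 ^ bs.length := pv_foldl_lt bs hrest
    have hpos : 0 < 2 ^ bs.length := Nat.pow_pos (by omega)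
    have hdiv : X / 2 ^ bs.length = 2 * acc + b := by
      rw [hcl, Nat.add_comm, Nat.add_mul_div_right _ _ hpos, Nat.div_eq_of_lt hlt, Nat.zero_add]
    have htb : X.testBit bs.length = decide (b = 1) := by
      have h0 : X.testBit bs.length = (X >>> bs.length).testBit 0 := by
        rw [Nat.testBit_shiftRight, Nat.add_zero]
      rw [h0, Nat.shiftRight_eq_div_pow, hdiv]
      rcases (by omega : b = 0 ∨ b = 1) with rfl | rfl <;> simp [Nat.testBit_zero]
    refine List.cons_eq_cons.mpr ⟨?_, ih _ hrest⟩
    rw [htb]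
    rcases (by omega : b = 0 ∨ b = 1) with rfl | rfl <;> simp

theorem pv_toBits_getElem? (n v i : Nat) (hi : i < n) :
    (pvToBits n v)[i]? = some (if v.testBit (n - 1 - i) then (1 : Int) else 0) := by
  induction n generalizing i with
  | zero => omega
  | succ n ih =>
    cases i with
    | zero => simp [pvToBits]
    | succ j =>
      have hj : j < n := by omega
      have e : n + 1 - 1 - (j + 1) = n - 1 - j := by omega
      simp only [pvToBits, List.getElem?_cons_succ, e]
      exact ih j hj

theorem pv_permN_foldl_aux (v n : Nat) (tab : List Nat) (acc : Nat) :
    tab.foldl (fun out p => (out <<< 1) ||| ((v >>> (n - p)) &&& 1)) acc =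
      (tab.map (fun p => (v >>> (n - p)) &&& 1)).foldl (fun a b => 2 * a + b) acc := by
  induction tab generalizing acc with
  | nil => rfl
  | cons p tab ih =>
    simp only [List.foldl_cons, List.map_cons]
    have hbit : (v >>> (n - p)) &&& 1 < 2 := by
      rw [Nat.and_one_is_mod]; omega
    have : (acc <<< 1) ||| ((v >>> (n - p)) &&& 1) = 2 * acc + ((v >>> (n - p)) &&& 1) := by
      rw [Nat.shiftLeft_eq]
      have e : acc * 2 ^ 1 = 2 * acc := by ring
      rw [e, pv_or_two _ _ hbit]
    rw [this, ih]

theorem pv_permN_eq (v n : Nat) (tab : List Nat) :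
    pvPermN v n tab =
      (tab.map (fun p => (v >>> (n - p)) &&& 1)).foldl (fun a b => 2 * a + b) 0 :=
  pv_permN_foldl_aux v n tab 0

theorem pv_bitval (x i : Nat) : (x >>> i) &&& 1 = if x.testBit i then 1 else 0 := by
  rw [Nat.and_one_is_mod]
  have h : x.testBit i = decide ((x >>> i) % 2 = 1) := by
    rw [← Nat.testBit_zero, Nat.testBit_shiftRight, Nat.add_zero]
  rw [h]
  rcases (by omega : (x >>> i) % 2 = 0 ∨ (x >>> i) % 2 = 1) with h2 | h2 <;> simp [h2]

theorem pv_perm_corr (tab : List Nat) (n v : Nat) (hb : ∀ p ∈ tab, 1 ≤ p ∧ p ≤ n) :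
    pvPermutate (pvToBits n v) (tab.map (fun p => Int.ofNat p)) =
      pvToBits tab.length (pvPermN v n tab) := by
  rw [pv_permN_eq]
  have hlt : ∀ b ∈ tab.map (fun p => (v >>> (n - p)) &&& 1), b < 2 := by
    intro b hbm
    obtain ⟨p, _, rfl⟩ := List.mem_map.mp hbm
    rw [Nat.and_one_is_mod]; omega
  rw [show tab.length = (tab.map (fun p => (v >>> (n - p)) &&& 1)).length from (List.length_map ..).symm,
      pv_toBits_foldl _ 0 hlt]
  unfold pvPermutate
  rw [List.map_map, List.map_map]
  apply List.map_congr_left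
  intro p hp
  obtain ⟨h1, h2⟩ := hb p hp
  simp only [Function.comp]
  have e1 : (Int.ofNat p - 1) = ((p - 1 : Nat) : Int) := by
    simp only [Int.ofNat_eq_natCast]; omega
  rw [e1, PySem.List.pyGet?_natCast, pv_toBits_getElem? n v (p - 1) (by omega)]
  have e2 : n - 1 - (p - 1) = n - p := by omega
  rw [e2, Option.getD_some, pv_bitval]
  rcases h3 : v.testBit (n - p) <;> simp

theorem pv_permN_lt (v n : Nat) (tab : List Nat) : pvPermN v n tab < 2 ^ tab.length := by
  rw [pv_permN_eq, show tab.length = (tab.map (fun p => (v >>> (n - p)) &&& 1)).length from (List.length_map ..).symm]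
  apply pv_foldl_lt
  intro b hbm
  obtain ⟨p, _, rfl⟩ := List.mem_map.mp hbm
  rw [Nat.and_one_is_mod]; omega


-- ===== bounds =====
theorem pv_shift_lt (m n x : Nat) (h : x < 2 ^ (m + n)) : x >>> n < 2 ^ m := by
  rw [Nat.shiftRight_eq_div_pow]
  apply Nat.div_lt_of_lt_mul
  rw [← Nat.pow_add, Nat.add_comm n m]
  exact h

theorem pv_orshl_lt (m n a b : Nat) (ha : a < 2 ^ m) (hb : b < 2 ^ n) :
    (a <<< n) ||| b < 2 ^ (m + n) := by
  apply Nat.or_lt_two_pow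
  · rw [Nat.shiftLeft_eq, Nat.pow_add]
    exact (Nat.mul_lt_mul_right (Nat.pow_pos (by omega : (0:Nat) < 2))).mpr ha
  · exact lt_of_lt_of_le hb (Nat.pow_le_pow_right (by omega) (by omega))

theorem pv_rol5_lt (x s : Nat) : pvRol5 x s < 32 := by
  unfold pvRol5
  have := Nat.and_le_right (n := (x <<< s) ||| (x >>> (5 - s))) (m := 31)
  omega

theorem pv_getD_lt (t : List (List Nat)) (h : ∀ r ∈ t, ∀ y ∈ r, y < 4) (row col : Nat) :
    (t.getD row []).getD col 0 < 4 := by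
  have h1 : t.getD row [] = [] ∨ t.getD row [] ∈ t := by
    rw [List.getD_eq_getElem?_getD]
    cases ht : t[row]? with
    | none => left; rfl
    | some r => right; simpa using List.mem_of_getElem? ht
  rcases h1 with h1 | h1
  · rw [h1]; simp
  · set r := t.getD row [] with hr
    have h2 : r.getD col 0 = 0 ∨ r.getD col 0 ∈ r := by
      rw [List.getD_eq_getElem?_getD]
      cases ht : r[col]? with
      | none => left; rfl
      | some y => right; simpa using List.mem_of_getElem? ht
    rcases h2 with h2 | h2
    · omega
    · exact h r h1 _ h2

theorem pv_sboxN_lt_S1 (x : Nat) : pvSboxN x pvS1N < 4 := pv_getD_lt _ (by decide) _ _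

theorem pv_fkN_lt (b k : Nat) (hb : b < 256) : pvFkN b k < 256 := by
  simp only [pvFkN]
  set t := pvPermN (b &&& 15) 4 pvEPN ^^^ k with ht
  set sv := (pvSboxN (t >>> 4) pvS0N <<< 2) ||| pvSboxN (t &&& 15) pvS1N with hs
  have h1 : b >>> 4 < 2 ^ 4 := pv_shift_lt 4 4 b (by norm_num; omega)
  have h2 : pvPermN sv 4 pvP4N < 2 ^ 4 := by simpa using pv_permN_lt sv 4 pvP4N
  have h3 : (b >>> 4) ^^^ pvPermN sv 4 pvP4N < 2 ^ 4 := Nat.xor_lt_two_pow h1 h2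
  have h4 : b &&& 15 < 2 ^ 4 := by
    have := Nat.and_le_right (n := b) (m := 15); norm_num; omega
  have h5 := pv_orshl_lt 4 4 _ _ h3 h4
  norm_num at h5
  exact h5

theorem pv_encBlockN_lt (b k1 k2 : Nat) : pvEncBlockN b k1 k2 < 256 := by
  simp only [pvEncBlockN]
  simpa using pv_permN_lt _ 8 pvIPINVN

theorem pv_keysN_lt (K : Nat) : (pvKeysN K).1 < 256 ∧ (pvKeysN K).2 < 256 := by
  simp only [pvKeysN]
  constructor <;> simpa using pv_permN_lt _ 10 pvP8N

-- ===== per-table correspondences =====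
theorem pv_corr_P10 (v : Nat) :
    pvPermutate (pvToBits 10 v) pvP10 = pvToBits 10 (pvPermN v 10 pvP10N) := by
  have e : pvP10N.map (fun p => Int.ofNat p) = pvP10 := by decide
  have h := pv_perm_corr pvP10N 10 v (by decide)
  rw [e] at h
  exact h

theorem pv_corr_P8 (v : Nat) :
    pvPermutate (pvToBits 10 v) pvP8 = pvToBits 8 (pvPermN v 10 pvP8N) := by
  have e : pvP8N.map (fun p => Int.ofNat p) = pvP8 := by decide
  have h := pv_perm_corr pvP8N 10 v (by decide)
  rw [e] at h
  exact h

theorem pv_corr_P4 (v : Nat) :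
    pvPermutate (pvToBits 4 v) pvP4 = pvToBits 4 (pvPermN v 4 pvP4N) := by
  have e : pvP4N.map (fun p => Int.ofNat p) = pvP4 := by decide
  have h := pv_perm_corr pvP4N 4 v (by decide)
  rw [e] at h
  exact h

theorem pv_corr_EP (v : Nat) :
    pvPermutate (pvToBits 4 v) pvEP = pvToBits 8 (pvPermN v 4 pvEPN) := by
  have e : pvEPN.map (fun p => Int.ofNat p) = pvEP := by decide
  have h := pv_perm_corr pvEPN 4 v (by decide)
  rw [e] at h
  exact h

theorem pv_corr_IP (v : Nat) :
    pvPermutate (pvToBits 8 v) pvIP = pvToBits 8 (pvPermN v 8 pvIPN) := by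
  have e : pvIPN.map (fun p => Int.ofNat p) = pvIP := by decide
  have h := pv_perm_corr pvIPN 8 v (by decide)
  rw [e] at h
  exact h

theorem pv_corr_IPINV (v : Nat) :
    pvPermutate (pvToBits 8 v) pvIPINV = pvToBits 8 (pvPermN v 8 pvIPINVN) := by
  have e : pvIPINVN.map (fun p => Int.ofNat p) = pvIPINV := by decide
  have h := pv_perm_corr pvIPINVN 8 v (by decide)
  rw [e] at h
  exact h

-- ===== small finite correspondences (checked case by case) =====
theorem pv_corr_S0 : ∀ v, v < 16 → pvSboxLookup (pvToBits 4 v) pvS0 = pvToBits 2 (pvSboxN v pvS0N) := by decide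
theorem pv_corr_S1 : ∀ v, v < 16 → pvSboxLookup (pvToBits 4 v) pvS1 = pvToBits 2 (pvSboxN v pvS1N) := by decide
theorem pv_corr_rol1 : ∀ v, v < 32 → pvLeftShift (pvToBits 5 v) 1 = pvToBits 5 (pvRol5 v 1) := by decide
theorem pv_corr_rol2 : ∀ v, v < 32 → pvLeftShift (pvToBits 5 v) 2 = pvToBits 5 (pvRol5 v 2) := by decide
theorem pv_fmt8 : ∀ v : Nat, v < 256 → pvFmtBits (v : Int) 8 = pvToBits 8 v := by decide
theorem pv_b2i : ∀ v : Nat, v < 256 → pvBitsToInt (pvToBits 8 v) = (v : Int) := by decide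

-- mask specializations
theorem pv_mask4 (v : Nat) : pvToBits 4 (v &&& 15) = pvToBits 4 v := by
  have := pv_toBits_mask 4 v; norm_num at this; exact this
theorem pv_mask5 (v : Nat) : pvToBits 5 (v &&& 31) = pvToBits 5 v := by
  have := pv_toBits_mask 5 v; norm_num at this; exact this

-- slices of bit lists
theorem pv_slice_hi44 (v : Nat) :
    PySem.List.slice (pvToBits 8 v) none (some 4) = pvToBits 4 (v >>> 4) := by
  rw [PySem.List.slice_to _ (by omega)]; exact pv_toBits_take 4 4 v
theorem pv_slice_lo44 (v : Nat) :
    PySem.List.slice (pvToBits 8 v) (some 4) none = pvToBits 4 v := by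
  rw [PySem.List.slice_from _ (by omega)]; exact pv_toBits_drop 4 4 v
theorem pv_slice_hi55 (v : Nat) :
    PySem.List.slice (pvToBits 10 v) none (some 5) = pvToBits 5 (v >>> 5) := by
  rw [PySem.List.slice_to _ (by omega)]; exact pv_toBits_take 5 5 v
theorem pv_slice_lo55 (v : Nat) :
    PySem.List.slice (pvToBits 10 v) (some 5) none = pvToBits 5 v := by
  rw [PySem.List.slice_from _ (by omega)]; exact pv_toBits_drop 5 5 v

-- ===== composite correspondences =====
theorem pv_keys_corr (K : Nat) :
    pvGenerateKeys (pvToBits 10 K) = (pvToBits 8 (pvKeysN K).1, pvToBits 8 (pvKeysN K).2) := by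
  simp only [pvGenerateKeys, pvKeysN]
  rw [pv_corr_P10 K]
  set k := pvPermN K 10 pvP10N with hk
  have hklt : k < 2 ^ 10 := by simpa using pv_permN_lt K 10 pvP10N
  rw [pv_slice_hi55 k, pv_slice_lo55 k]
  rw [show pvToBits 5 k = pvToBits 5 (k &&& 31) from (pv_mask5 k).symm]
  have hl : k >>> 5 < 32 := by simpa using pv_shift_lt 5 5 k hklt
  have hr : k &&& 31 < 32 := by have := Nat.and_le_right (n := k) (m := 31); omega
  rw [pv_corr_rol1 _ hl, pv_corr_rol1 _ hr]
  set l1 := pvRol5 (k >>> 5) 1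
  set r1 := pvRol5 (k &&& 31) 1
  have c1 : pvToBits 5 l1 ++ pvToBits 5 r1 = pvToBits 10 ((l1 <<< 5) ||| r1) :=
    (pv_comb 5 5 l1 r1 (by simpa using pv_rol5_lt (k &&& 31) 1)).symm
  rw [c1, pv_corr_P8]
  rw [pv_corr_rol2 _ (pv_rol5_lt _ _), pv_corr_rol2 _ (pv_rol5_lt _ _)]
  set l2 := pvRol5 l1 2
  set r2 := pvRol5 r1 2
  have c2 : pvToBits 5 l2 ++ pvToBits 5 r2 = pvToBits 10 ((l2 <<< 5) ||| r2) :=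
    (pv_comb 5 5 l2 r2 (by simpa using pv_rol5_lt r1 2)).symm
  rw [c2, pv_corr_P8]

theorem pv_fk_corr (b k : Nat) (hk : k < 256) :
    pvFk (pvToBits 8 b) (pvToBits 8 k) = pvToBits 8 (pvFkN b k) := by
  simp only [pvFk, pvFkN]
  rw [pv_slice_hi44 b, pv_slice_lo44 b]
  rw [show pvToBits 4 b = pvToBits 4 (b &&& 15) from (pv_mask4 b).symm, pv_corr_EP]
  set ep := pvPermN (b &&& 15) 4 pvEPN with hep
  have heplt : ep < 256 := by simpa using pv_permN_lt (b &&& 15) 4 pvEPN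
  rw [pv_xor_toBits 8 ep k]
  set t := ep ^^^ k with ht
  have htlt : t < 256 := by
    have : t < 2 ^ 8 := Nat.xor_lt_two_pow (by norm_num; omega) (by norm_num; omega)
    omega
  rw [pv_slice_hi44 t, pv_slice_lo44 t]
  have hs0 : t >>> 4 < 16 := by simpa using pv_shift_lt 4 4 t (by norm_num; omega)
  have hs1 : t &&& 15 < 16 := by have := Nat.and_le_right (n := t) (m := 15); omega
  rw [pv_corr_S0 _ hs0]
  rw [show pvToBits 4 t = pvToBits 4 (t &&& 15) from (pv_mask4 t).symm, pv_corr_S1 _ hs1]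
  set s0v := pvSboxN (t >>> 4) pvS0N
  set s1v := pvSboxN (t &&& 15) pvS1N
  have c1 : pvToBits 2 s0v ++ pvToBits 2 s1v = pvToBits 4 ((s0v <<< 2) ||| s1v) :=
    (pv_comb 2 2 s0v s1v (by simpa using pv_sboxN_lt_S1 (t &&& 15))).symm
  rw [c1, pv_corr_P4]
  rw [pv_xor_toBits 4 (b >>> 4) _]
  set y := (b >>> 4) ^^^ pvPermN ((s0v <<< 2) ||| s1v) 4 pvP4N
  have c2 : pvToBits 4 y ++ pvToBits 4 (b &&& 15) = pvToBits 8 ((y <<< 4) ||| (b &&& 15)) :=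
    (pv_comb 4 4 y (b &&& 15)
      (by have := Nat.and_le_right (n := b) (m := 15); norm_num; omega)).symm
  rw [c2]

theorem pv_block_corr (b k1 k2 : Nat) (h1 : k1 < 256) (h2 : k2 < 256) :
    pvEncryptBlock (pvToBits 8 b) (pvToBits 8 k1) (pvToBits 8 k2) =
      pvToBits 8 (pvEncBlockN b k1 k2) := by
  simp only [pvEncryptBlock, pvEncBlockN]
  rw [pv_corr_IP, pv_fk_corr _ _ h1]
  set x1 := pvPermN b 8 pvIPN with hx1
  have hx1lt : x1 < 256 := by simpa using pv_permN_lt b 8 pvIPN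
  set r1 := pvFkN x1 k1 with hr1
  have hr1lt : r1 < 256 := pv_fkN_lt x1 k1 hx1lt
  rw [pv_slice_lo44 r1, pv_slice_hi44 r1]
  have c1 : pvToBits 4 r1 ++ pvToBits 4 (r1 >>> 4) = pvToBits 8 (((r1 &&& 15) <<< 4) ||| (r1 >>> 4)) := by
    rw [show pvToBits 4 r1 = pvToBits 4 (r1 &&& 15) from (pv_mask4 r1).symm]
    exact (pv_comb 4 4 (r1 &&& 15) (r1 >>> 4)
      (by simpa using pv_shift_lt 4 4 r1 (by norm_num; omega))).symm
  rw [c1, pv_fk_corr _ _ h2, pv_corr_IPINV]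

-- ===== string level =====
theorem pv_b2c_chunk (w : Nat) (hw : w < 256) (rest : List Int) :
    pvBitsToChars (pvToBits 8 w ++ rest) = Char.ofNat w :: pvBitsToChars rest := by
  rw [pvBitsToChars]
  have hlen : (pvToBits 8 w ++ rest).length = 8 + rest.length := by
    simp [pv_len_toBits]
  rw [dif_neg (by intro h; rw [h] at hlen; simp at hlen; omega)]
  rw [List.take_left' (pv_len_toBits 8 w), List.drop_left' (pv_len_toBits 8 w)]
  rw [pv_b2i w hw, Int.toNat_natCast]

theorem pv_loop_corr (cs : List Char) (hcs : ∀ c ∈ cs, c.toNat < 256) (k1 k2 : Nat)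
    (h1 : k1 < 256) (h2 : k2 < 256) :
    pvBitsToChars (pvEncLoop (cs.flatMap (fun c => pvToBits 8 c.toNat)) (pvToBits 8 k1) (pvToBits 8 k2))
      = cs.map (fun c => Char.ofNat (pvEncBlockN c.toNat k1 k2)) := by
  induction cs with
  | nil =>
    rw [List.flatMap_nil, pvEncLoop, dif_pos rfl, pvBitsToChars, dif_pos rfl, List.map_nil]
  | cons c cs ih =>
    rw [List.flatMap_cons, pvEncLoop]
    have hlen : (pvToBits 8 c.toNat ++ cs.flatMap (fun c => pvToBits 8 c.toNat)).length
        = 8 + (cs.flatMap (fun c => pvToBits 8 c.toNat)).length := by simp [pv_len_toBits]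
    rw [dif_neg (by intro h; rw [h] at hlen; simp at hlen; omega)]
    simp only [List.take_left' (pv_len_toBits 8 c.toNat), List.drop_left' (pv_len_toBits 8 c.toNat),
      pv_len_toBits, Nat.sub_self, List.replicate_zero, List.append_nil]
    rw [pv_block_corr c.toNat k1 k2 h1 h2]
    rw [pv_b2c_chunk _ (pv_encBlockN_lt c.toNat k1 k2) _]
    rw [ih (fun x hx => hcs x (by simp [hx])), List.map_cons]

theorem pv_s2b_eq (cs : List Char) (h : ∀ c ∈ cs, c.toNat < 256) :
    cs.flatMap (fun c => pvFmtBits ((c.toNat : Nat) : Int) 8) = cs.flatMap (fun c => pvToBits 8 c.toNat) := by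
  induction cs with
  | nil => rfl
  | cons c cs ih =>
    rw [List.flatMap_cons, List.flatMap_cons, pv_fmt8 _ (h c (by simp)),
        ih (fun x hx => h x (by simp [hx]))]

theorem pv_key10_take (c0 c1 : Nat) (h0 : c0 < 256) (h1 : c1 < 256) (rest : List Int) :
    (pvFmtBits (c0 : Int) 8 ++ (pvFmtBits (c1 : Int) 8 ++ rest)).take 10
      = pvToBits 10 ((c0 <<< 2) ||| (c1 >>> 6)) := by
  rw [pv_fmt8 c0 h0, pv_fmt8 c1 h1]
  have hd : c1 >>> 6 < 2 ^ 2 := pv_shift_lt 2 6 c1 (by norm_num; omega)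
  rw [pv_comb 8 2 c0 (c1 >>> 6) hd]
  rw [List.take_append, List.take_append]
  rw [List.take_of_length_le (by rw [pv_len_toBits]; omega)]
  rw [pv_len_toBits, pv_len_toBits]
  norm_num
  exact pv_toBits_take 2 6 c1

theorem pv_domChar_lt (c : Char) (h : pvDomChar c = true) : c.toNat < 256 := by
  simp [pvDomChar] at h
  omega

theorem sdes_encrypt_spec : Claim_equal_sdes_encrypt := by
  intro pt key hDom hPre
  unfold Spec_sdes_encrypt
  unfold Dom_sdes_encrypt at hDom
  rw [Bool.and_eq_true] at hDom
  obtain ⟨hdp, hdk⟩ := hDom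
  have hptc : ∀ c ∈ pt.toList, c.toNat < 256 := by
    intro c hc
    exact pv_domChar_lt c (List.all_eq_true.mp hdp c hc)
  have hkc : ∀ c ∈ key.toList, c.toNat < 256 := by
    intro c hc
    exact pv_domChar_lt c (List.all_eq_true.mp hdk c hc)
  unfold Pre_sdes_encrypt at hPre
  rw [PySem.Str.len_eq] at hPre
  have hlen : 2 ≤ key.toList.length := by exact_mod_cast hPre
  obtain ⟨c0, c1, rest, hk⟩ : ∃ c0 c1 rest, key.toList = c0 :: c1 :: rest := by
    cases h : key.toList with
    | nil => rw [h] at hlen; simp at hlen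
    | cons a tl =>
      cases h2 : tl with
      | nil => rw [h, h2] at hlen; simp at hlen
      | cons b tl2 => exact ⟨a, b, tl2, by rw [h2] at h⟩
  have h0 : c0.toNat < 256 := hkc c0 (by rw [hk]; simp)
  have h1 : c1.toNat < 256 := hkc c1 (by rw [hk]; simp)
  set K := (c0.toNat <<< 2) ||| (c1.toNat >>> 6) with hKdef
  have hB : sdes_encrypt_alt pt key =
      String.ofList (pt.toList.map (fun c => Char.ofNat (pvEncBlockN c.toNat (pvKeysN K).1 (pvKeysN K).2))) := by
    unfold sdes_encrypt_alt
    rw [hk]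
  have hA : sdes_encrypt pt key =
      String.ofList (pvBitsToChars (pvEncLoop (pt.toList.flatMap (fun c => pvToBits 8 c.toNat))
        (pvToBits 8 (pvKeysN K).1) (pvToBits 8 (pvKeysN K).2))) := by
    simp only [sdes_encrypt, pvStringToBits]
    rw [hk, List.flatMap_cons, List.flatMap_cons]
    rw [PySem.List.slice_to _ (by omega)]
    rw [show ((10 : Int)).toNat = 10 from rfl]
    rw [pv_key10_take c0.toNat c1.toNat h0 h1 _]
    rw [pv_keys_corr K]
    rw [pv_s2b_eq pt.toList hptc]
  rw [hA, hB]
  rw [pv_loop_corr pt.toList hptc _ _ (pv_keysN_lt K).1 (pv_keysN_lt K).2]
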